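-- pv_equiv track=rewrite | github.com/icepaule/icepaule.github.io | scripts/generate_docs.py | strip_readme_title
-- ===== SOURCE A (Python) =====
-- def strip_readme_title(text, repo_name):
--     """Remove the first H1 heading if it matches the repo name (we add our own)."""
--     lines = text.split('\n')
--     for i, line in enumerate(lines):
--         stripped = line.strip()
--         if not stripped:
--             continue
--         if stripped.startswith('# '):
--             # Remove the first H1
--             lines[i] = ''
--             break
--         else:
--             # First non-empty line is not H1, stop
--             break
--     return '\n'.join(lines).strip()
-- ===== SOURCE B (Python) =====
-- def strip_readme_title(text, repo_name):
--     """Remove the first H1 heading if it matches the repo name (we add our own)."""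
--     s = text.strip()
--     head, _, rest = s.partition('\n')
--     if head.strip().startswith('# '):
--         return rest.strip()
--     return s
-- ===== Notes on version B (the rewrite author's own statement) =====
-- stated objective: simpler
-- what changed: Replaces the split-into-lines/enumerate scan with list mutation by a direct strip + partition on the whole string: after text.strip() the first line is the first non-empty line, so one startswith test on its stripped form decides whether to drop it and strip the remainder.
import Mathlib
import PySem

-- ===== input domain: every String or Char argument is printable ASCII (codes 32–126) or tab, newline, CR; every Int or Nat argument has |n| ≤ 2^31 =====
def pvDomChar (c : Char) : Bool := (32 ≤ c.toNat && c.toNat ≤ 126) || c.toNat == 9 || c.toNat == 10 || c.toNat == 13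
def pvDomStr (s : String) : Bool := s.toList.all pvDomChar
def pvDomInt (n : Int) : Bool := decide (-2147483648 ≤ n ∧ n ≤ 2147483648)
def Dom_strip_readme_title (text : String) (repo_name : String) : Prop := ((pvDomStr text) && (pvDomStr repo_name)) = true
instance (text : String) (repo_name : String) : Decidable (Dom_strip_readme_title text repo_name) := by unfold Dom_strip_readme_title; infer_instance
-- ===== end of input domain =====

-- B replaces A's split-into-lines scan (with in-place list mutation) by a direct
-- strip + partition of the whole string; same result, simpler decomposition.


-- ===== PORT A =====
-- the for-loop over enumerate(lines): skip whitespace-only lines; at the first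
-- non-empty one either blank it (H1) or stop — exactly A's control flow
def pvLoopA : List (List Char) → List (List Char)
  | [] => []
  | l :: rest =>
    let stripped := PySem.Chars.strip l
    if stripped = [] then l :: pvLoopA rest
    else if PySem.Chars.startswith stripped ['#', ' '] then [] :: rest
    else l :: rest

def strip_readme_title (text : String) (repo_name : String) : String :=
  let lines := PySem.Chars.splitOn text.toList ['\n']
  String.ofList (PySem.Chars.strip (PySem.Chars.join ['\n'] (pvLoopA lines)))

-- ===== PORT B =====
-- s.partition('\n') ported by hand via find (exact: Python partition splits at the
-- first occurrence, or returns (s, '', '') when absent)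
def strip_readme_title_alt (text : String) (repo_name : String) : String :=
  let s := PySem.Chars.strip text.toList
  let i := PySem.Chars.find s ['\n']
  let head := if i = -1 then s else s.take i.toNat
  let rest := if i = -1 then ([] : List Char) else s.drop (i.toNat + 1)
  if PySem.Chars.startswith (PySem.Chars.strip head) ['#', ' '] then
    String.ofList (PySem.Chars.strip rest)
  else
    String.ofList s

-- ===== PRECONDITION & SPEC =====
def Spec_strip_readme_title (text : String) (repo_name : String) (out : String) : Prop := out = strip_readme_title_alt text repo_name
instance (text : String) (repo_name : String) (out : String) : Decidable (Spec_strip_readme_title text repo_name out) := by unfold Spec_strip_readme_title; infer_instance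

-- ===== CLAIM (what is proved, stated in full; the proofs are below) =====
def Claim_equal_strip_readme_title : Prop := ∀ (text : String) (repo_name : String), Dom_strip_readme_title text repo_name → Spec_strip_readme_title text repo_name (strip_readme_title text repo_name)

-- ===== LEMMAS AND PROOFS =====

def pvSplitNL : List Char → List (List Char)
  | [] => [[]]
  | c :: rest =>
    if c = '\n' then [] :: pvSplitNL rest
    else
      match pvSplitNL rest with
      | [] => [[c]]
      | p :: ps => (c :: p) :: ps

def pvConsHead (p : List Char) : List (List Char) → List (List Char)
  | [] => [p]
  | q :: qs => (p ++ q) :: qs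

theorem pvSplitNL_ne_nil (cs : List Char) : pvSplitNL cs ≠ [] := by
  cases cs with
  | nil => simp [pvSplitNL]
  | cons c rest =>
    simp only [pvSplitNL]
    split
    · simp
    · split <;> simp

theorem pv_go_cons (f : Nat) (c : Char) (rest cur : List Char) (acc : List (List Char)) :
    PySem.Chars.splitOn.go ['\n'] (f + 1) (c :: rest) cur acc =
      if c = '\n' then PySem.Chars.splitOn.go ['\n'] f rest [] (cur.reverse :: acc)
      else PySem.Chars.splitOn.go ['\n'] f rest (c :: cur) acc := by
  rw [PySem.Chars.splitOn.go.eq_def]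
  by_cases hc : c = '\n'
  · simp [List.isPrefixOf, hc]
  · have hpre : List.isPrefixOf ['\n'] (c :: rest) = false := by
      simp [List.isPrefixOf]; exact fun h => hc h.symm
    simp [hpre, hc]

theorem pv_go_spec (l : List Char) : ∀ (fuel : Nat) (cur : List Char) (acc : List (List Char)),
    l.length < fuel →
    PySem.Chars.splitOn.go ['\n'] fuel l cur acc = acc.reverse ++ pvConsHead cur.reverse (pvSplitNL l) := by
  induction l with
  | nil =>
    intro fuel cur acc h
    rw [PySem.Chars.splitOn.go.eq_2 _ _ _ _ (by omega)]
    simp [pvSplitNL, pvConsHead]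
  | cons c rest ih =>
    intro fuel cur acc h
    cases fuel with
    | zero => omega
    | succ f =>
      rw [pv_go_cons]
      by_cases hc : c = '\n'
      · rw [if_pos hc, ih f [] _ (by simp at h ⊢; omega)]
        subst hc
        simp only [pvSplitNL]
        cases hq : pvSplitNL rest with
        | nil => exact absurd hq (pvSplitNL_ne_nil rest)
        | cons p ps => simp [pvConsHead]
      · rw [if_neg hc, ih f _ _ (by simp at h ⊢; omega)]
        simp only [pvSplitNL, if_neg hc]
        cases hq : pvSplitNL rest with
        | nil => exact absurd hq (pvSplitNL_ne_nil rest)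
        | cons p ps => simp [pvConsHead]

theorem pv_splitOn_eq (cs : List Char) : PySem.Chars.splitOn cs ['\n'] = pvSplitNL cs := by
  unfold PySem.Chars.splitOn
  rw [pv_go_spec cs (cs.length + 1) [] [] (by omega)]
  cases hq : pvSplitNL cs with
  | nil => exact absurd hq (pvSplitNL_ne_nil cs)
  | cons p ps => simp [pvConsHead]

theorem pv_join_cons_ne (l : List Char) (L : List (List Char)) (h : L ≠ []) :
    PySem.Chars.join ['\n'] (l :: L) = l ++ '\n' :: PySem.Chars.join ['\n'] L := by
  cases L with
  | nil => exact absurd rfl h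
  | cons q r => rw [PySem.Chars.join_cons_cons]; simp

theorem pv_join_pvSplitNL (cs : List Char) : PySem.Chars.join ['\n'] (pvSplitNL cs) = cs := by
  induction cs with
  | nil => simp [pvSplitNL, PySem.Chars.join_singleton]
  | cons c rest ih =>
    simp only [pvSplitNL]
    by_cases hc : c = '\n'
    · rw [if_pos hc, pv_join_cons_ne _ _ (pvSplitNL_ne_nil rest), ih, hc]
      simp
    · rw [if_neg hc]
      cases hq : pvSplitNL rest with
      | nil => exact absurd hq (pvSplitNL_ne_nil rest)
      | cons p ps =>
        cases ps with
        | nil =>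
          rw [PySem.Chars.join_singleton]
          rw [hq, PySem.Chars.join_singleton] at ih
          simp [ih]
        | cons p2 ps2 =>
          rw [PySem.Chars.join_cons_cons]
          rw [hq, PySem.Chars.join_cons_cons] at ih
          simp at ih ⊢
          simp [ih]

theorem pv_splitNL_no_nl (cs : List Char) : ∀ p ∈ pvSplitNL cs, '\n' ∉ p := by
  induction cs with
  | nil => simp [pvSplitNL]
  | cons c rest ih =>
    intro p hp
    simp only [pvSplitNL] at hp
    by_cases hc : c = '\n'
    · rw [if_pos hc] at hp
      rcases List.mem_cons.mp hp with h | h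
      · simp [h]
      · exact ih p h
    · rw [if_neg hc] at hp
      cases hq : pvSplitNL rest with
      | nil => exact absurd hq (pvSplitNL_ne_nil rest)
      | cons q qs =>
        rw [hq] at hp
        rcases List.mem_cons.mp hp with h | h
        · subst h
          intro hmem
          rcases List.mem_cons.mp hmem with h1 | h1
          · exact hc h1.symm
          · exact ih q (by rw [hq]; exact List.mem_cons_self) h1
        · exact ih p (by rw [hq]; exact List.mem_cons_of_mem _ h)

-- ===== whitespace kit =====
theorem pv_lstrip_eq_nil_iff (l : List Char) :
    PySem.Chars.lstrip l = [] ↔ l.all PySem.Chars.isspace := by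
  simp [PySem.Chars.lstrip, List.dropWhile_eq_nil_iff, List.all_eq_true]

theorem pv_rstrip_eq_nil_iff (l : List Char) :
    PySem.Chars.rstrip l = [] ↔ l.all PySem.Chars.isspace := by
  simp [PySem.Chars.rstrip, List.dropWhile_eq_nil_iff, List.all_eq_true]

theorem pv_strip_eq_nil_iff (l : List Char) :
    PySem.Chars.strip l = [] ↔ l.all PySem.Chars.isspace := by
  unfold PySem.Chars.strip
  rw [pv_rstrip_eq_nil_iff]
  constructor
  · intro h
    rw [← pv_lstrip_eq_nil_iff]
    cases hq : PySem.Chars.lstrip l with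
    | nil => rfl
    | cons x t =>
      exfalso
      have hx : PySem.Chars.isspace x = false := by
        have := List.head?_dropWhile_not PySem.Chars.isspace l
        unfold PySem.Chars.lstrip at hq
        rw [hq] at this
        simpa using this
      rw [hq] at h
      simp [List.all_eq_true] at h
      have := h.1
      rw [hx] at this
      exact Bool.noConfusion this
  · intro h
    rw [(pv_lstrip_eq_nil_iff l).mpr h]
    simp

theorem pv_lstrip_append_all {a : List Char} (b : List Char) (h : a.all PySem.Chars.isspace) :
    PySem.Chars.lstrip (a ++ b) = PySem.Chars.lstrip b := by
  unfold PySem.Chars.lstrip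
  rw [List.dropWhile_append]
  have : a.dropWhile PySem.Chars.isspace = [] := by
    rw [List.dropWhile_eq_nil_iff]
    simpa [List.all_eq_true] using h
  simp [this]

theorem pv_lstrip_append_ne {a : List Char} (b : List Char) (h : PySem.Chars.lstrip a ≠ []) :
    PySem.Chars.lstrip (a ++ b) = PySem.Chars.lstrip a ++ b := by
  unfold PySem.Chars.lstrip at *
  rw [List.dropWhile_append]
  simp [List.isEmpty_iff, h]

theorem pv_rstrip_append_all (a : List Char) {b : List Char} (h : b.all PySem.Chars.isspace) :
    PySem.Chars.rstrip (a ++ b) = PySem.Chars.rstrip a := by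
  unfold PySem.Chars.rstrip
  rw [List.reverse_append, List.dropWhile_append]
  have : b.reverse.dropWhile PySem.Chars.isspace = [] := by
    rw [List.dropWhile_eq_nil_iff]
    simp only [List.all_eq_true] at h
    intro x hx
    exact h x (List.mem_reverse.mp hx)
  simp [this]

theorem pv_rstrip_append_ne (a : List Char) {b : List Char} (h : ¬ b.all PySem.Chars.isspace) :
    PySem.Chars.rstrip (a ++ b) = a ++ PySem.Chars.rstrip b := by
  unfold PySem.Chars.rstrip
  rw [List.reverse_append, List.dropWhile_append]
  have hne : b.reverse.dropWhile PySem.Chars.isspace ≠ [] := by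
    rw [Ne, List.dropWhile_eq_nil_iff]
    intro hall
    exact h (by simp [List.all_eq_true]; intro x hx; exact hall x (List.mem_reverse.mpr hx))
  simp [List.isEmpty_iff, hne]

theorem pv_lstrip_lstrip (l : List Char) :
    PySem.Chars.lstrip (PySem.Chars.lstrip l) = PySem.Chars.lstrip l := by
  unfold PySem.Chars.lstrip
  exact List.dropWhile_idempotent _ _

theorem pv_strip_lstrip (l : List Char) :
    PySem.Chars.strip (PySem.Chars.lstrip l) = PySem.Chars.strip l := by
  unfold PySem.Chars.strip
  rw [pv_lstrip_lstrip]

theorem pv_rstrip_prefix (l : List Char) : PySem.Chars.rstrip l <+: l := by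
  unfold PySem.Chars.rstrip
  have h := (List.dropWhile_suffix (l := l.reverse) PySem.Chars.isspace)
  rcases h with ⟨t, ht⟩
  exact ⟨t.reverse, by rw [← List.reverse_append, ht, List.reverse_reverse]⟩

theorem pv_rstrip_rstrip (l : List Char) :
    PySem.Chars.rstrip (PySem.Chars.rstrip l) = PySem.Chars.rstrip l := by
  unfold PySem.Chars.rstrip
  simp [List.dropWhile_idempotent]

theorem pv_lstrip_suffix (l : List Char) : PySem.Chars.lstrip l <:+ l :=
  List.dropWhile_suffix _

theorem pv_strip_infix (l : List Char) : PySem.Chars.strip l <:+: l := by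
  unfold PySem.Chars.strip
  exact ((pv_rstrip_prefix _).isInfix).trans (pv_lstrip_suffix l).isInfix

theorem pv_head_lstrip {y : List Char} {x : Char} {t : List Char}
    (h : PySem.Chars.lstrip y = x :: t) : PySem.Chars.isspace x = false := by
  have := List.head?_dropWhile_not PySem.Chars.isspace y
  unfold PySem.Chars.lstrip at h
  rw [h] at this
  simpa using this

theorem pv_lstrip_cons_neg {x : Char} (t : List Char) (h : PySem.Chars.isspace x = false) :
    PySem.Chars.lstrip (x :: t) = x :: t := by
  unfold PySem.Chars.lstrip
  rw [List.dropWhile_cons_of_neg (by simp [h])]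

theorem pv_strip_cons_ws {c : Char} (X : List Char) (h : PySem.Chars.isspace c = true) :
    PySem.Chars.strip (c :: X) = PySem.Chars.strip X := by
  unfold PySem.Chars.strip PySem.Chars.lstrip
  rw [List.dropWhile_cons_of_pos h]

theorem pv_strip_append_ws {a : List Char} (b : List Char) (h : a.all PySem.Chars.isspace) :
    PySem.Chars.strip (a ++ b) = PySem.Chars.strip b := by
  unfold PySem.Chars.strip
  rw [pv_lstrip_append_all b h]

theorem pv_strip_rstrip (y : List Char) :
    PySem.Chars.strip (PySem.Chars.rstrip y) = PySem.Chars.strip y := by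
  by_cases hall : y.all PySem.Chars.isspace
  · rw [(pv_rstrip_eq_nil_iff y).mpr hall, (pv_strip_eq_nil_iff y).mpr hall]
    simp [PySem.Chars.strip, PySem.Chars.lstrip, PySem.Chars.rstrip]
  · have hz : PySem.Chars.lstrip y ≠ [] := fun h => hall ((pv_lstrip_eq_nil_iff y).mp h)
    obtain ⟨x, t, hxt⟩ : ∃ x t, PySem.Chars.lstrip y = x :: t := by
      cases h : PySem.Chars.lstrip y with
      | nil => exact absurd h hz
      | cons a b => exact ⟨a, b, rfl⟩
    have hx : PySem.Chars.isspace x = false := pv_head_lstrip hxt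
    have hzall : ¬ (x :: t).all PySem.Chars.isspace := by simp [hx]
    have hy : y = y.takeWhile PySem.Chars.isspace ++ (x :: t) := by
      rw [← hxt]; unfold PySem.Chars.lstrip; rw [List.takeWhile_append_dropWhile]
    have hw : (y.takeWhile PySem.Chars.isspace).all PySem.Chars.isspace := by
      simp only [List.all_eq_true]
      intro c hc
      exact List.mem_takeWhile_imp hc
    -- rstrip of x :: t keeps the head x
    obtain ⟨t', ht'⟩ : ∃ t', PySem.Chars.rstrip (x :: t) = x :: t' := by
      have hne : PySem.Chars.rstrip (x :: t) ≠ [] :=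
        fun h => hzall ((pv_rstrip_eq_nil_iff _).mp h)
      obtain ⟨u, hu⟩ := pv_rstrip_prefix (x :: t)
      cases h : PySem.Chars.rstrip (x :: t) with
      | nil => exact absurd h hne
      | cons a b =>
        rw [h] at hu
        simp at hu
        exact ⟨b, by rw [hu.1]⟩
    calc PySem.Chars.strip (PySem.Chars.rstrip y)
        = PySem.Chars.strip (PySem.Chars.rstrip (y.takeWhile PySem.Chars.isspace ++ (x :: t))) := by rw [← hy]
      _ = PySem.Chars.strip (y.takeWhile PySem.Chars.isspace ++ PySem.Chars.rstrip (x :: t)) := by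
            rw [pv_rstrip_append_ne _ hzall]
      _ = PySem.Chars.strip (PySem.Chars.rstrip (x :: t)) := pv_strip_append_ws _ hw
      _ = PySem.Chars.rstrip (PySem.Chars.rstrip (x :: t)) := by
            unfold PySem.Chars.strip
            rw [ht', pv_lstrip_cons_neg _ hx]
      _ = PySem.Chars.rstrip (x :: t) := pv_rstrip_rstrip _
      _ = PySem.Chars.strip y := by
            unfold PySem.Chars.strip
            rw [hxt]

theorem pv_strip_idem (l : List Char) :
    PySem.Chars.strip (PySem.Chars.strip l) = PySem.Chars.strip l := by
  calc PySem.Chars.strip (PySem.Chars.rstrip (PySem.Chars.lstrip l))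
      = PySem.Chars.strip (PySem.Chars.lstrip l) := pv_strip_rstrip _
    _ = PySem.Chars.strip l := pv_strip_lstrip l

-- ===== find kit =====
theorem pv_singleton_prefix (c : Char) (w : List Char) : [c] <+: w ↔ w.head? = some c := by
  cases w with
  | nil => simp
  | cons d t => simp [List.cons_prefix_cons, eq_comm]

theorem pv_prefix_drop (c : Char) (s : List Char) (i : Nat) :
    [c] <+: s.drop i ↔ s[i]? = some c := by
  rw [pv_singleton_prefix, List.head?_drop]

theorem pv_find_not_mem {c : Char} {s : List Char} (h : c ∉ s) :
    PySem.Chars.find s [c] = -1 := by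
  rw [PySem.Chars.find_eq_neg_one_iff]
  rw [List.singleton_infix_iff]
  exact h

theorem pv_find_append {c : Char} {u : List Char} (v : List Char) (h : c ∉ u) :
    PySem.Chars.find (u ++ c :: v) [c] = (u.length : Int) := by
  have hinf : [c] <:+: (u ++ c :: v) := by
    rw [List.singleton_infix_iff]
    exact List.mem_append_right _ List.mem_cons_self
  have hpos : 0 ≤ PySem.Chars.find (u ++ c :: v) [c] :=
    (PySem.Chars.find_nonneg_iff _ _).mpr hinf
  obtain ⟨hpre, hmin⟩ := PySem.Chars.find_spec hpos
  set n := (PySem.Chars.find (u ++ c :: v) [c]).toNat with hn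
  have hat : (u ++ c :: v)[u.length]? = some c := by
    rw [List.getElem?_append_right (le_refl _)]
    simp
  have hprelen : [c] <+: (u ++ c :: v).drop u.length := (pv_prefix_drop _ _ _).mpr hat
  have h1 : ¬ u.length < n := fun hlt => hmin u.length hlt hprelen
  have h2 : ¬ n < u.length := by
    intro hlt
    have := (pv_prefix_drop c (u ++ c :: v) n).mp hpre
    rw [List.getElem?_append_left hlt] at this
    exact h (List.mem_of_getElem? this)
  have : n = u.length := by omega
  omega

theorem pv_isspace_nl : PySem.Chars.isspace '\n' = true := by decide

-- B's core on an already-stripped string (proof-side restatement of strip_readme_title_alt's body)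
def pvBcore (s : List Char) : List Char :=
  let i := PySem.Chars.find s ['\n']
  let head := if i = -1 then s else s.take i.toNat
  let rest := if i = -1 then ([] : List Char) else s.drop (i.toNat + 1)
  if PySem.Chars.startswith (PySem.Chars.strip head) ['#', ' '] then PySem.Chars.strip rest else s

theorem pv_strip_nil : PySem.Chars.strip [] = [] := by
  simp [PySem.Chars.strip, PySem.Chars.lstrip, PySem.Chars.rstrip]

theorem pvBcore_of_not_mem {s : List Char} (h : '\n' ∉ s) :
    pvBcore s = if PySem.Chars.startswith (PySem.Chars.strip s) ['#', ' '] then [] else s := by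
  unfold pvBcore
  rw [pv_find_not_mem h]
  simp [pv_strip_nil]

theorem pvBcore_split {A R : List Char} (h : '\n' ∉ A) :
    pvBcore (A ++ '\n' :: R) =
      if PySem.Chars.startswith (PySem.Chars.strip A) ['#', ' '] then PySem.Chars.strip R
      else A ++ '\n' :: R := by
  unfold pvBcore
  rw [pv_find_append R h]
  have hne : ¬ ((A.length : Int) = -1) := by omega
  simp only [if_neg hne, Int.toNat_natCast]
  rw [List.take_left]
  have hd : (A ++ '\n' :: R).drop (A.length + 1) = R := List.drop_length_add_append 1
  rw [hd]

theorem pvLoopA_cons (l : List Char) (rest : List (List Char)) :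
    pvLoopA (l :: rest) =
      if PySem.Chars.strip l = [] then l :: pvLoopA rest
      else if PySem.Chars.startswith (PySem.Chars.strip l) ['#', ' '] then [] :: rest
      else l :: rest := rfl

theorem pvLoopA_ne_nil {L : List (List Char)} (h : L ≠ []) : pvLoopA L ≠ [] := by
  cases L with
  | nil => exact absurd rfl h
  | cons l rest =>
    simp only [pvLoopA]
    split
    · simp
    · split <;> simp

theorem pv_main : ∀ (L : List (List Char)), L ≠ [] → (∀ p ∈ L, '\n' ∉ p) →
    PySem.Chars.strip (PySem.Chars.join ['\n'] (pvLoopA L)) =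
      pvBcore (PySem.Chars.strip (PySem.Chars.join ['\n'] L)) := by
  intro L
  induction L with
  | nil => intro h; exact absurd rfl h
  | cons l L' ih =>
    intro _ hnl
    have hll : '\n' ∉ l := hnl l List.mem_cons_self
    cases L' with
    | nil =>
      rw [PySem.Chars.join_singleton]
      by_cases h0 : PySem.Chars.strip l = []
      · rw [pvLoopA_cons, if_pos h0]
        rw [show pvLoopA [] = [] from rfl, PySem.Chars.join_singleton, h0]
        rw [pvBcore_of_not_mem (by simp)]
        simp [pv_strip_nil, PySem.Chars.startswith]
      · have hns : '\n' ∉ PySem.Chars.strip l :=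
          fun hm => hll ((pv_strip_infix l).subset hm)
        rw [pvBcore_of_not_mem hns, pv_strip_idem]
        by_cases hs : PySem.Chars.startswith (PySem.Chars.strip l) ['#', ' '] = true
        · rw [pvLoopA_cons, if_neg h0, if_pos hs]
          rw [PySem.Chars.join_singleton, pv_strip_nil, if_pos hs]
        · rw [pvLoopA_cons, if_neg h0, if_neg hs]
          rw [PySem.Chars.join_singleton, if_neg hs]
    | cons q r =>
      have hL' : (q :: r : List (List Char)) ≠ [] := by simp
      have hnl' : ∀ p ∈ (q :: r : List (List Char)), '\n' ∉ p :=
        fun p hp => hnl p (List.mem_cons_of_mem _ hp)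
      have ihx := ih hL' hnl'
      set J := PySem.Chars.join ['\n'] (q :: r) with hJdef
      rw [pv_join_cons_ne _ _ hL']
      by_cases h0 : PySem.Chars.strip l = []
      · have hall : (l ++ ['\n']).all PySem.Chars.isspace := by
          have := (pv_strip_eq_nil_iff l).mp h0
          simp [List.all_eq_true] at this ⊢
          refine ⟨this, by decide⟩
        rw [pvLoopA_cons, if_pos h0]
        rw [pv_join_cons_ne _ _ (pvLoopA_ne_nil hL')]
        rw [show l ++ '\n' :: PySem.Chars.join ['\n'] (pvLoopA (q :: r)) =
              (l ++ ['\n']) ++ PySem.Chars.join ['\n'] (pvLoopA (q :: r)) by simp]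
        rw [show l ++ '\n' :: J = (l ++ ['\n']) ++ J by simp]
        rw [pv_strip_append_ws _ hall, pv_strip_append_ws _ hall]
        exact ihx
      · have hl : PySem.Chars.lstrip l ≠ [] := by
          intro h
          exact h0 (by unfold PySem.Chars.strip; rw [h]; exact pv_strip_nil)
        have hsl : PySem.Chars.strip (l ++ '\n' :: J)
            = PySem.Chars.rstrip (PySem.Chars.lstrip l ++ '\n' :: J) := by
          unfold PySem.Chars.strip
          rw [show l ++ '\n' :: J = l ++ ('\n' :: J) by simp]
          rw [pv_lstrip_append_ne _ hl]
        have hnsl : '\n' ∉ PySem.Chars.lstrip l :=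
          fun hm => hll ((pv_lstrip_suffix l).subset hm)
        by_cases hJ : J.all PySem.Chars.isspace
        · have hallJ : ('\n' :: J).all PySem.Chars.isspace := by
            simp [List.all_eq_true] at hJ ⊢
            exact ⟨by decide, hJ⟩
          have hs2 : PySem.Chars.strip (l ++ '\n' :: J) = PySem.Chars.strip l := by
            rw [hsl, show PySem.Chars.lstrip l ++ '\n' :: J
                = PySem.Chars.lstrip l ++ ('\n' :: J) by simp]
            rw [pv_rstrip_append_all _ hallJ]
            rfl
          rw [hs2]
          have hns : '\n' ∉ PySem.Chars.strip l :=
            fun hm => hll ((pv_strip_infix l).subset hm)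
          rw [pvBcore_of_not_mem hns, pv_strip_idem]
          by_cases hs : PySem.Chars.startswith (PySem.Chars.strip l) ['#', ' '] = true
          · rw [pvLoopA_cons, if_neg h0, if_pos hs]
            rw [pv_join_cons_ne _ _ hL', if_pos hs]
            rw [show ([] : List Char) ++ '\n' :: J = '\n' :: J by simp]
            rw [pv_strip_cons_ws _ pv_isspace_nl]
            exact (pv_strip_eq_nil_iff J).mpr hJ
          · rw [pvLoopA_cons, if_neg h0, if_neg hs]
            rw [pv_join_cons_ne _ _ hL', if_neg hs, hs2]
        · have hallJ : ¬ ('\n' :: J).all PySem.Chars.isspace := by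
            simp [List.all_eq_true] at hJ ⊢
            intro _
            simpa [List.all_eq_true] using hJ
          have hs2 : PySem.Chars.strip (l ++ '\n' :: J)
              = PySem.Chars.lstrip l ++ '\n' :: PySem.Chars.rstrip J := by
            rw [hsl, show PySem.Chars.lstrip l ++ '\n' :: J
                = PySem.Chars.lstrip l ++ ('\n' :: J) by simp]
            rw [pv_rstrip_append_ne _ hallJ]
            rw [show ('\n' :: J) = ['\n'] ++ J by simp]
            rw [pv_rstrip_append_ne _ hJ]
            simp
          rw [hs2, pvBcore_split hnsl, pv_strip_lstrip, pv_strip_rstrip]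
          by_cases hs : PySem.Chars.startswith (PySem.Chars.strip l) ['#', ' '] = true
          · rw [pvLoopA_cons, if_neg h0, if_pos hs]
            rw [pv_join_cons_ne _ _ hL', if_pos hs]
            rw [show ([] : List Char) ++ '\n' :: J = '\n' :: J by simp]
            rw [pv_strip_cons_ws _ pv_isspace_nl]
          · rw [pvLoopA_cons, if_neg h0, if_neg hs]
            rw [pv_join_cons_ne _ _ hL', if_neg hs, hs2]

theorem pv_alt_eq (text repo_name : String) :
    strip_readme_title_alt text repo_name = String.ofList (pvBcore (PySem.Chars.strip text.toList)) := by
  unfold strip_readme_title_alt pvBcore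
  dsimp only
  by_cases hi : PySem.Chars.find (PySem.Chars.strip text.toList) ['\n'] = -1
  · simp only [if_pos hi]
    split <;> rfl
  · simp only [if_neg hi]
    split <;> rfl

theorem pv_a_eq (text repo_name : String) :
    strip_readme_title text repo_name =
      String.ofList (PySem.Chars.strip (PySem.Chars.join ['\n']
        (pvLoopA (PySem.Chars.splitOn text.toList ['\n'])))) := rfl

-- ===== VERDICT (by name: the statement is the Claim_ definition above) =====
theorem strip_readme_title_spec : Claim_equal_strip_readme_title := by
  intro text repo_name _
  unfold Spec_strip_readme_title
  rw [pv_alt_eq, pv_a_eq, pv_splitOn_eq]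
  have h := pv_main (pvSplitNL text.toList) (pvSplitNL_ne_nil _) (pv_splitNL_no_nl _)
  rw [pv_join_pvSplitNL] at h
  rw [h]
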